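-- pv_equiv track=rewrite | github.com/tolksvillage/GO_Pipeline | go_pipeline/scripts/paths_keywords_from_representatives.py | get_signature_name_from_directory
-- ===== SOURCE A (Python) =====
-- def get_signature_name_from_directory(directory_name):
--     """Strips dilution suffixes from a directory name to recover the original signature name."""
--     name = directory_name
--     if name.startswith("diluted_"):
--         name = name[len("diluted_"):]
--     cut_markers = ["_step", "_totalrandom", "_total"]
--     cut_positions = [name.find(m) for m in cut_markers if m in name]
--     if cut_positions:
--         name = name[:min(cut_positions)]
--     return name
-- ===== SOURCE B (Python) =====
-- def get_signature_name_from_directory(directory_name):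
--     """Strips dilution suffixes from a directory name to recover the original signature name."""
--     name = directory_name
--     if name.startswith("diluted_"):
--         name = name[len("diluted_"):]
--     for i in range(len(name)):
--         if name.startswith("_step", i) or name.startswith("_total", i):
--             return name[:i]
--     return name
-- ===== Notes on version B (the rewrite author's own statement) =====
-- stated objective: alternative
-- what changed: Replaces the three separate str.find scans plus min() with a single left-to-right scan that cuts at the first position where either remaining cut marker starts (the longest marker is redundant because a shorter marker is its prefix).
import Mathlib
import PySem

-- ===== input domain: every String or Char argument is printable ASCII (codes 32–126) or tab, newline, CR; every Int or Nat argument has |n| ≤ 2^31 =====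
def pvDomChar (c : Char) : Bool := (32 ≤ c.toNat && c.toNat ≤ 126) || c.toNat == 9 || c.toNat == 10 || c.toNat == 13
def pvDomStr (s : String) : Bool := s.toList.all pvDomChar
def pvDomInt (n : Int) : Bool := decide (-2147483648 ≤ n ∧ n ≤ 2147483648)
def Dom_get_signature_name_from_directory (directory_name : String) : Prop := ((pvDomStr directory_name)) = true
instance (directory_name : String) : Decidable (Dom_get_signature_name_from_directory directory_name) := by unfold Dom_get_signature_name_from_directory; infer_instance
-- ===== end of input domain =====

-- B replaces A's three str.find scans + min() by one left-to-right scan cutting at the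
-- first position where "_step" or "_total" starts ("_totalrandom" is redundant); alternative, not faster.

-- ===== PORT A =====
-- marker cut, transliterating: cut_positions = [name.find(m) for m in cut_markers if m in name];
-- if cut_positions: name = name[:min(cut_positions)]
def pvACut (name : List Char) : List Char :=
  let cut_markers : List String := ["_step", "_totalrandom", "_total"]
  let cut_positions : List Int :=
    (cut_markers.filter (fun m => PySem.Chars.isIn m.toList name)).map
      (fun m => PySem.Chars.find name m.toList)
  match PySem.List.min? cut_positions (fun x => x) with
  | some p => PySem.List.slice name none (some p)
  | none => name

def get_signature_name_from_directory (directory_name : String) : String :=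
  let name := directory_name.toList
  let name := if PySem.Chars.startswith name "diluted_".toList then
      PySem.List.slice name (some (8 : Int)) none else name
  String.ofList (pvACut name)

-- ===== PORT B =====
-- one scan: first index i with name.startswith("_step", i) or name.startswith("_total", i)
def pvBFind : List Char → Option Nat
  | [] => none
  | c :: rest =>
    if "_step".toList.isPrefixOf (c :: rest) || "_total".toList.isPrefixOf (c :: rest) then
      some 0
    else (pvBFind rest).map (· + 1)

def get_signature_name_from_directory_alt (directory_name : String) : String :=
  let name := directory_name.toList
  let name := if "diluted_".toList.isPrefixOf name then name.drop 8 else name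
  match pvBFind name with
  | some i => String.ofList (name.take i)
  | none => String.ofList name

-- ===== PRECONDITION & SPEC =====
def Spec_get_signature_name_from_directory (directory_name : String) (out : String) : Prop := out = get_signature_name_from_directory_alt directory_name
instance (directory_name : String) (out : String) : Decidable (Spec_get_signature_name_from_directory directory_name out) := by unfold Spec_get_signature_name_from_directory; infer_instance

-- ===== CLAIM (what is proved, stated in full; the proofs are below) =====
def Claim_equal_get_signature_name_from_directory : Prop := ∀ (directory_name : String), Dom_get_signature_name_from_directory directory_name → Spec_get_signature_name_from_directory directory_name (get_signature_name_from_directory directory_name)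

-- ===== LEMMAS AND PROOFS =====

theorem pvBFind_unique {s : List Char} {n : Nat}
    (h1 : "_step".toList <+: s.drop n ∨ "_total".toList <+: s.drop n)
    (h2 : ∀ j < n, ¬ "_step".toList <+: s.drop j ∧ ¬ "_total".toList <+: s.drop j) :
    pvBFind s = some n := by
  induction s generalizing n with
  | nil =>
    exfalso
    rcases h1 with h1 | h1 <;> { rw [List.drop_nil, List.prefix_nil] at h1; simp at h1 }
  | cons c rest ih =>
    unfold pvBFind
    cases n with
    | zero =>
      have : ("_step".toList.isPrefixOf (c :: rest) || "_total".toList.isPrefixOf (c :: rest)) = true := by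
        simp only [Bool.or_eq_true, List.isPrefixOf_iff_prefix]
        simpa using h1
      rw [if_pos this]
    | succ m =>
      have h0 := h2 0 (Nat.succ_pos m)
      have hcond : ¬ ("_step".toList.isPrefixOf (c :: rest) || "_total".toList.isPrefixOf (c :: rest)) = true := by
        simp only [Bool.or_eq_true, List.isPrefixOf_iff_prefix]
        push Not
        simpa using h0
      rw [if_neg hcond]
      have : pvBFind rest = some m := by
        apply ih
        · simpa using h1
        · intro j hj
          have := h2 (j + 1) (by omega)
          simpa using this
      rw [this]; rfl

theorem pvBFind_some_spec {s : List Char} {n : Nat} (h : pvBFind s = some n) :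
    ("_step".toList <+: s.drop n ∨ "_total".toList <+: s.drop n) ∧
      ∀ j < n, ¬ "_step".toList <+: s.drop j ∧ ¬ "_total".toList <+: s.drop j := by
  induction s generalizing n with
  | nil => simp [pvBFind] at h
  | cons c rest ih =>
    unfold pvBFind at h
    split at h
    · rename_i hcond
      have hn : n = 0 := by simpa using h.symm
      subst hn
      simp only [Bool.or_eq_true, List.isPrefixOf_iff_prefix] at hcond
      exact ⟨by simpa using hcond, by omega⟩
    · rename_i hcond
      simp only [Bool.or_eq_true, List.isPrefixOf_iff_prefix] at hcond
      push Not at hcond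
      rcases n with _ | m
      · exfalso
        cases hb : pvBFind rest <;> rw [hb] at h <;> simp at h
      · have hb : pvBFind rest = some m := by
          cases hb : pvBFind rest <;> rw [hb] at h <;> simp at h
          · simpa [h] using hb
        have := ih hb
        refine ⟨by simpa using this.1, ?_⟩
        intro j hj
        cases j with
        | zero => simpa using hcond
        | succ k => simpa using this.2 k (by omega)

theorem not_prefix_drop {sub s : List Char} (h : PySem.Chars.isIn sub s = false) (j : Nat) :
    ¬ sub <+: s.drop j := by
  intro hp
  have : PySem.Chars.isIn sub s = true := (PySem.Chars.exists_prefix_drop_iff_isIn sub s).mp ⟨j, hp⟩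
  rw [h] at this; exact absurd this (by simp)

theorem pvBFind_eq_none {s : List Char}
    (hs : ¬ "_step".toList <:+: s) (ht : ¬ "_total".toList <:+: s) :
    pvBFind s = none := by
  cases hb : pvBFind s with
  | none => rfl
  | some n =>
    exfalso
    rcases (pvBFind_some_spec hb).1 with h | h
    · exact hs ((PySem.Chars.isIn_iff_infix _ _).mp
        ((PySem.Chars.exists_prefix_drop_iff_isIn _ _).mp ⟨n, h⟩))
    · exact ht ((PySem.Chars.isIn_iff_infix _ _).mp
        ((PySem.Chars.exists_prefix_drop_iff_isIn _ _).mp ⟨n, h⟩))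

theorem pvCore_eq (s : List Char) :
    pvACut s = (match pvBFind s with
      | some i => s.take i
      | none => s) := by
  have htr : "_total".toList <+: "_totalrandom".toList := by decide
  by_cases hs : "_step".toList <:+: s <;> by_cases hr : "_totalrandom".toList <:+: s <;>
    by_cases ht : "_total".toList <:+: s
  ·
    have hiS : PySem.Chars.isIn "_step".toList s = true := (PySem.Chars.isIn_iff_infix _ _).mpr hs
    have hiR : PySem.Chars.isIn "_totalrandom".toList s = true := (PySem.Chars.isIn_iff_infix _ _).mpr hr
    have hiT : PySem.Chars.isIn "_total".toList s = true := (PySem.Chars.isIn_iff_infix _ _).mpr ht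
    set F := PySem.Chars.find s "_step".toList with hFd
    set R := PySem.Chars.find s "_totalrandom".toList with hRd
    set T := PySem.Chars.find s "_total".toList with hTd
    have hF0 : 0 ≤ F := (PySem.Chars.find_nonneg_iff _ _).mpr hs
    have sF := PySem.Chars.find_spec hF0
    have hR0 : 0 ≤ R := (PySem.Chars.find_nonneg_iff _ _).mpr hr
    have sR := PySem.Chars.find_spec hR0
    have hT0 : 0 ≤ T := (PySem.Chars.find_nonneg_iff _ _).mpr ht
    have sT := PySem.Chars.find_spec hT0
    have h0 : 0 ≤ min (min F R) T := le_min (le_min hF0 hR0) hT0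
    have hit : "_step".toList <+: s.drop (min (min F R) T).toNat ∨ "_total".toList <+: s.drop (min (min F R) T).toNat := by
      rcases min_choice (min F R) T with h | h
      · rcases min_choice F R with h2 | h2
        · rw [h, h2]; exact Or.inl sF.1
        · rw [h, h2]; exact Or.inr (List.IsPrefix.trans htr sR.1)
      · rw [h]; exact Or.inr sT.1
    have hmin : ∀ j < (min (min F R) T).toNat, ¬ "_step".toList <+: s.drop j ∧ ¬ "_total".toList <+: s.drop j := by
      intro j hj
      have pF : min (min F R) T ≤ F := by simp
      have pT : min (min F R) T ≤ T := by simp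
      exact ⟨sF.2 j (by omega), sT.2 j (by omega)⟩
    have hB := pvBFind_unique hit hmin
    unfold pvACut
    simp only [List.filter, hiS, hiR, hiT, List.map, PySem.List.min?_id_cons, List.foldl, hB]
    rw [PySem.List.slice_to _ h0]
  · exact absurd ((List.IsPrefix.isInfix htr).trans hr) ht
  ·
    have hiS : PySem.Chars.isIn "_step".toList s = true := (PySem.Chars.isIn_iff_infix _ _).mpr hs
    have hiR : PySem.Chars.isIn "_totalrandom".toList s = false := (PySem.Chars.isIn_eq_false_iff _ _).mpr hr
    have hiT : PySem.Chars.isIn "_total".toList s = true := (PySem.Chars.isIn_iff_infix _ _).mpr ht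
    set F := PySem.Chars.find s "_step".toList with hFd
    set R := PySem.Chars.find s "_totalrandom".toList with hRd
    set T := PySem.Chars.find s "_total".toList with hTd
    have hF0 : 0 ≤ F := (PySem.Chars.find_nonneg_iff _ _).mpr hs
    have sF := PySem.Chars.find_spec hF0
    have hT0 : 0 ≤ T := (PySem.Chars.find_nonneg_iff _ _).mpr ht
    have sT := PySem.Chars.find_spec hT0
    have h0 : 0 ≤ min F T := le_min hF0 hT0
    have hit : "_step".toList <+: s.drop (min F T).toNat ∨ "_total".toList <+: s.drop (min F T).toNat := by
      rcases min_choice F T with h | h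
      · rw [h]; exact Or.inl sF.1
      · rw [h]; exact Or.inr sT.1
    have hmin : ∀ j < (min F T).toNat, ¬ "_step".toList <+: s.drop j ∧ ¬ "_total".toList <+: s.drop j := by
      intro j hj
      have pF : min F T ≤ F := by simp
      have pT : min F T ≤ T := by simp
      exact ⟨sF.2 j (by omega), sT.2 j (by omega)⟩
    have hB := pvBFind_unique hit hmin
    unfold pvACut
    simp only [List.filter, hiS, hiR, hiT, List.map, PySem.List.min?_id_cons, List.foldl, hB]
    rw [PySem.List.slice_to _ h0]
  ·
    have hiS : PySem.Chars.isIn "_step".toList s = true := (PySem.Chars.isIn_iff_infix _ _).mpr hs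
    have hiR : PySem.Chars.isIn "_totalrandom".toList s = false := (PySem.Chars.isIn_eq_false_iff _ _).mpr hr
    have hiT : PySem.Chars.isIn "_total".toList s = false := (PySem.Chars.isIn_eq_false_iff _ _).mpr ht
    set F := PySem.Chars.find s "_step".toList with hFd
    set R := PySem.Chars.find s "_totalrandom".toList with hRd
    set T := PySem.Chars.find s "_total".toList with hTd
    have hF0 : 0 ≤ F := (PySem.Chars.find_nonneg_iff _ _).mpr hs
    have sF := PySem.Chars.find_spec hF0
    have nT := not_prefix_drop hiT
    have h0 : 0 ≤ F := hF0
    have hit : "_step".toList <+: s.drop (F).toNat ∨ "_total".toList <+: s.drop (F).toNat := by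
      exact Or.inl sF.1
    have hmin : ∀ j < (F).toNat, ¬ "_step".toList <+: s.drop j ∧ ¬ "_total".toList <+: s.drop j := by
      intro j hj
      exact ⟨sF.2 j (by omega), nT j⟩
    have hB := pvBFind_unique hit hmin
    unfold pvACut
    simp only [List.filter, hiS, hiR, hiT, List.map, PySem.List.min?_id_cons, List.foldl, hB]
    rw [PySem.List.slice_to _ h0]
  ·
    have hiS : PySem.Chars.isIn "_step".toList s = false := (PySem.Chars.isIn_eq_false_iff _ _).mpr hs
    have hiR : PySem.Chars.isIn "_totalrandom".toList s = true := (PySem.Chars.isIn_iff_infix _ _).mpr hr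
    have hiT : PySem.Chars.isIn "_total".toList s = true := (PySem.Chars.isIn_iff_infix _ _).mpr ht
    set F := PySem.Chars.find s "_step".toList with hFd
    set R := PySem.Chars.find s "_totalrandom".toList with hRd
    set T := PySem.Chars.find s "_total".toList with hTd
    have nS := not_prefix_drop hiS
    have hR0 : 0 ≤ R := (PySem.Chars.find_nonneg_iff _ _).mpr hr
    have sR := PySem.Chars.find_spec hR0
    have hT0 : 0 ≤ T := (PySem.Chars.find_nonneg_iff _ _).mpr ht
    have sT := PySem.Chars.find_spec hT0
    have h0 : 0 ≤ min R T := le_min hR0 hT0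
    have hit : "_step".toList <+: s.drop (min R T).toNat ∨ "_total".toList <+: s.drop (min R T).toNat := by
      rcases min_choice R T with h | h
      · rw [h]; exact Or.inr (List.IsPrefix.trans htr sR.1)
      · rw [h]; exact Or.inr sT.1
    have hmin : ∀ j < (min R T).toNat, ¬ "_step".toList <+: s.drop j ∧ ¬ "_total".toList <+: s.drop j := by
      intro j hj
      have pT : min R T ≤ T := by simp
      exact ⟨nS j, sT.2 j (by omega)⟩
    have hB := pvBFind_unique hit hmin
    unfold pvACut
    simp only [List.filter, hiS, hiR, hiT, List.map, PySem.List.min?_id_cons, List.foldl, hB]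
    rw [PySem.List.slice_to _ h0]
  · exact absurd ((List.IsPrefix.isInfix htr).trans hr) ht
  ·
    have hiS : PySem.Chars.isIn "_step".toList s = false := (PySem.Chars.isIn_eq_false_iff _ _).mpr hs
    have hiR : PySem.Chars.isIn "_totalrandom".toList s = false := (PySem.Chars.isIn_eq_false_iff _ _).mpr hr
    have hiT : PySem.Chars.isIn "_total".toList s = true := (PySem.Chars.isIn_iff_infix _ _).mpr ht
    set F := PySem.Chars.find s "_step".toList with hFd
    set R := PySem.Chars.find s "_totalrandom".toList with hRd
    set T := PySem.Chars.find s "_total".toList with hTd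
    have nS := not_prefix_drop hiS
    have hT0 : 0 ≤ T := (PySem.Chars.find_nonneg_iff _ _).mpr ht
    have sT := PySem.Chars.find_spec hT0
    have h0 : 0 ≤ T := hT0
    have hit : "_step".toList <+: s.drop (T).toNat ∨ "_total".toList <+: s.drop (T).toNat := by
      exact Or.inr sT.1
    have hmin : ∀ j < (T).toNat, ¬ "_step".toList <+: s.drop j ∧ ¬ "_total".toList <+: s.drop j := by
      intro j hj
      exact ⟨nS j, sT.2 j (by omega)⟩
    have hB := pvBFind_unique hit hmin
    unfold pvACut
    simp only [List.filter, hiS, hiR, hiT, List.map, PySem.List.min?_id_cons, List.foldl, hB]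
    rw [PySem.List.slice_to _ h0]
  ·
    have hiS : PySem.Chars.isIn "_step".toList s = false := (PySem.Chars.isIn_eq_false_iff _ _).mpr hs
    have hiR : PySem.Chars.isIn "_totalrandom".toList s = false := (PySem.Chars.isIn_eq_false_iff _ _).mpr hr
    have hiT : PySem.Chars.isIn "_total".toList s = false := (PySem.Chars.isIn_eq_false_iff _ _).mpr ht
    set F := PySem.Chars.find s "_step".toList with hFd
    set R := PySem.Chars.find s "_totalrandom".toList with hRd
    set T := PySem.Chars.find s "_total".toList with hTd
    have nS := not_prefix_drop hiS
    have nT := not_prefix_drop hiT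
    unfold pvACut
    simp only [List.filter, hiS, hiR, hiT, List.map, PySem.List.min?, pvBFind_eq_none hs ht]
    rfl

-- ===== VERDICT (by name: the statement is the Claim_ definition above) =====
theorem get_signature_name_from_directory_spec : Claim_equal_get_signature_name_from_directory := by
  intro d _
  unfold Spec_get_signature_name_from_directory
  unfold get_signature_name_from_directory get_signature_name_from_directory_alt
  have hsw : PySem.Chars.startswith d.toList "diluted_".toList = "diluted_".toList.isPrefixOf d.toList :=
    Bool.eq_iff_iff.mpr (by rw [PySem.Chars.startswith_iff, List.isPrefixOf_iff_prefix])
  have hsl : PySem.List.slice d.toList (some (8 : Int)) none = d.toList.drop 8 := by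
    rw [PySem.List.slice_from d.toList (by norm_num)]; simp
  simp only [hsw, hsl]
  rw [pvCore_eq]
  cases hpb : pvBFind (if List.isPrefixOf "diluted_".toList d.toList then List.drop 8 d.toList else d.toList) <;>
    simp
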